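-- pv_equiv track=rewrite | github.com/Hohnik/scheduler | Data.py | calculate_session_blocks
-- ===== SOURCE A (Python) =====
-- def calculate_session_blocks(sws:str) -> dict[tuple[int, int], int]:
--     block_sizes_dic = {}
--     num = 0
--     key_1 = 0
--     key_2 = 0
--     key_3 = 0
--     leftover_sws = int(sws)
--     while leftover_sws > 0:
--         if leftover_sws % 2 == 0:
--             block_sizes_dic[(2, key_2)] = num
--             num += 1
--             key_2 += 1
--             leftover_sws -= 2
--         elif leftover_sws >= 3:
--             block_sizes_dic[(3, key_3)] = num
--             num += 1
--             key_3 += 1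
--             leftover_sws -= 3
--         elif leftover_sws == 1:
--             block_sizes_dic[(1, key_1)] = num
--             num += 1
--             key_1 += 1
--             leftover_sws -= 1
--
--     return block_sizes_dic
-- ===== SOURCE B (Python) =====
-- def calculate_session_blocks(sws: str) -> dict[tuple[int, int], int]:
--     n = int(sws)
--     if n <= 0:
--         return {}
--     if n == 1:
--         return {(1, 0): 0}
--     if n % 2 == 0:
--         return {(2, i): i for i in range(n // 2)}
--     return {(3, 0): 0, **{(2, i): i + 1 for i in range((n - 3) // 2)}}
-- ===== Notes on version B (the rewrite author's own statement) =====
-- stated objective: simpler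
-- what changed: Replaces the subtract-2/3/1 while loop that peels one block per iteration with closed-form arithmetic on n's parity: a direct comprehension of n//2 two-blocks for even n, and a single 3-block plus (n-3)//2 two-blocks numbered from 1 for odd n.
import Mathlib
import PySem

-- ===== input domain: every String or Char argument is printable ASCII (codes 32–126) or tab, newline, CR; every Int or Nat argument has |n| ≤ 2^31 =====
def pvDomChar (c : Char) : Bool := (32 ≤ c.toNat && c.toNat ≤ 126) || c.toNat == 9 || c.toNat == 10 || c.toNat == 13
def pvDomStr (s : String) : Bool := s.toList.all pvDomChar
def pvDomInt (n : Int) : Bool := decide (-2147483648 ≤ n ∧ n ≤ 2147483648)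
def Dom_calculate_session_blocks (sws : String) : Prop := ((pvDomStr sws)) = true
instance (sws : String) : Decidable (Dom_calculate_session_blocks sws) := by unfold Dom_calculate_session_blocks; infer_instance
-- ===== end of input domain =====

-- B replaces A's subtract-2/3/1 while loop with closed-form arithmetic on n's parity
-- (direct comprehensions of the 2-blocks); same return value everywhere int(sws) parses.

-- ===== PORT A =====
-- the while loop; the final 'else d' is unreachable (leftover > 0, odd, < 3 and ≠ 1 is impossible)
def pvALoop (leftover num key1 key2 key3 : Int) (d : PySem.Dict (Int × Int) Int) :
    PySem.Dict (Int × Int) Int :=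
  if leftover > 0 then
    if PySem.Int.mod leftover 2 = 0 then
      pvALoop (leftover - 2) (num + 1) key1 (key2 + 1) key3 (d.insert (2, key2) num)
    else if leftover ≥ 3 then
      pvALoop (leftover - 3) (num + 1) key1 key2 (key3 + 1) (d.insert (3, key3) num)
    else if leftover = 1 then
      pvALoop (leftover - 1) (num + 1) (key1 + 1) key2 key3 (d.insert (1, key1) num)
    else d
  else d
  termination_by leftover.toNat
  decreasing_by all_goals omega

def calculate_session_blocks (sws : String) : List (Int × Int × Int) :=
  match PySem.Int.ofStr? sws with
  | none => []   -- int(sws) raises ValueError: excluded by Pre_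
  | some n => (pvALoop n 0 0 0 0 PySem.Dict.empty).items.map (fun p => (p.1.1, p.1.2, p.2))

-- ===== PORT B =====
def calculate_session_blocks_alt (sws : String) : List (Int × Int × Int) :=
  match PySem.Int.ofStr? sws with
  | none => []   -- int(sws) raises ValueError: excluded by Pre_
  | some n =>
    if n ≤ 0 then []
    else if n = 1 then [(1, 0, 0)]
    else if PySem.Int.mod n 2 = 0 then
      (PySem.List.pyRange 0 (PySem.Int.floordiv n 2) 1).map (fun i => (2, i, i))
    else
      (3, 0, 0) :: (PySem.List.pyRange 0 (PySem.Int.floordiv (n - 3) 2) 1).map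
        (fun i => (2, i, i + 1))

-- ===== PRECONDITION & SPEC =====
-- Pre_ excludes exactly the strings on which int(sws) raises ValueError (both A and B raise there).
def Pre_calculate_session_blocks (sws : String) : Prop := (PySem.Int.ofStr? sws).isSome = true
instance (sws : String) : Decidable (Pre_calculate_session_blocks sws) := by
  unfold Pre_calculate_session_blocks; infer_instance
def pvWitness_calculate_session_blocks : String := "7"

def Spec_calculate_session_blocks (sws : String) (out : List (Int × Int × Int)) : Prop := out = calculate_session_blocks_alt sws
instance (sws : String) (out : List (Int × Int × Int)) : Decidable (Spec_calculate_session_blocks sws out) := by unfold Spec_calculate_session_blocks; infer_instance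

-- ===== CLAIM (what is proved, stated in full; the proofs are below) =====
def Claim_equal_calculate_session_blocks : Prop := ∀ (sws : String), Dom_calculate_session_blocks sws → Pre_calculate_session_blocks sws → Spec_calculate_session_blocks sws (calculate_session_blocks sws)

-- ===== LEMMAS AND PROOFS =====

-- the loop on an even nonnegative leftover 2*m is a fold of m fresh inserts
lemma pvALoop_even (m : Nat) (num key1 key2 key3 : Int) (d : PySem.Dict (Int × Int) Int) :
    pvALoop (2 * (m : Int)) num key1 key2 key3 d =
      (List.range m).foldl (fun d i => d.insert (2, key2 + (i : Int)) (num + (i : Int))) d := by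
  induction m generalizing num key2 d with
  | zero => unfold pvALoop; simp
  | succ k ih =>
    rw [pvALoop]
    have h2 : PySem.Int.mod (2 * ((k + 1 : Nat) : Int)) 2 = 0 := by
      rw [PySem.Int.mod_eq_emod_of_pos (by omega)]; omega
    have hpos : (2 * ((k + 1 : Nat) : Int) > 0) := by push_cast; omega
    rw [if_pos hpos, if_pos h2]
    have harg : 2 * ((k + 1 : Nat) : Int) - 2 = 2 * ((k : Nat) : Int) := by push_cast; ring
    rw [harg, ih]
    rw [List.range_succ_eq_map, List.foldl_cons, List.foldl_map]
    simp only [Nat.cast_zero, add_zero]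
    congr 1
    funext d i
    have h1 : key2 + ((i.succ : Nat) : Int) = key2 + 1 + (i : Int) := by push_cast; ring
    have h2 : num + ((i.succ : Nat) : Int) = num + 1 + (i : Int) := by push_cast; ring
    rw [h1, h2]

lemma pvALoop_items_even (m : Nat) :
    (pvALoop (2 * (m : Int)) 0 0 0 0 PySem.Dict.empty).items =
      (List.range m).map (fun (i : Nat) => (((2 : Int), (i : Int)), (i : Int))) := by
  rw [pvALoop_even]
  rw [PySem.Dict.items_foldl_insert_fresh (List.range m)
      (fun i => ((2 : Int), (0 : Int) + (i : Int))) (fun i => (0 : Int) + (i : Int))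
      PySem.Dict.empty (fun a _ => PySem.Dict.contains_empty _)
      (List.Nodup.map (fun a b h => by simpa using h) List.nodup_range)]
  simp only [zero_add]
  simp [PySem.Dict.empty]

lemma pvALoop_items_odd (m : Nat) :
    (pvALoop (2 * (m : Int) + 3) 0 0 0 0 PySem.Dict.empty).items =
      (((3 : Int), (0 : Int)), (0 : Int)) ::
        (List.range m).map (fun (i : Nat) => (((2 : Int), (i : Int)), (i : Int) + 1)) := by
  rw [pvALoop]
  have hpos : (2 * (m : Int) + 3 > 0) := by omega
  have hmod : PySem.Int.mod (2 * (m : Int) + 3) 2 ≠ 0 := by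
    rw [PySem.Int.mod_eq_emod_of_pos (by omega)]; omega
  rw [if_pos hpos, if_neg hmod, if_pos (by omega : 2 * (m : Int) + 3 ≥ 3)]
  have harg : 2 * (m : Int) + 3 - 3 = 2 * (m : Int) := by ring
  rw [harg, pvALoop_even]
  rw [PySem.Dict.items_foldl_insert_fresh (List.range m)
      (fun i => ((2 : Int), (0 : Int) + (i : Int))) (fun i => (0 : Int) + 1 + (i : Int))
      (PySem.Dict.empty.insert (3, 0) 0)
      (fun a _ => by simp [PySem.Dict.contains_insert, PySem.Dict.contains_empty])
      (List.Nodup.map (fun a b h => by simpa using h) List.nodup_range)]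
  · simp only [zero_add]
    simp [PySem.Dict.empty, PySem.Dict.insert, add_comm]

-- ===== VERDICT (by name: the statement is the Claim_ definition above) =====
theorem calculate_session_blocks_spec : Claim_equal_calculate_session_blocks := by
  intro sws _ hpre
  unfold Spec_calculate_session_blocks calculate_session_blocks calculate_session_blocks_alt
  unfold Pre_calculate_session_blocks at hpre
  cases hp : PySem.Int.ofStr? sws with
  | none => rfl
  | some n =>
    simp only
    by_cases hle : n ≤ 0
    · rw [if_pos hle]
      rw [pvALoop, if_neg (by omega)]
      rfl
    · rw [if_neg hle]
      by_cases h1 : n = 1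
      · subst h1
        rw [if_pos rfl]
        rw [pvALoop, if_pos (by norm_num),
          if_neg (by rw [PySem.Int.mod_eq_emod_of_pos (by norm_num)]; norm_num),
          if_neg (by norm_num), if_pos rfl]
        rw [pvALoop, if_neg (by norm_num)]
        rfl
      · rw [if_neg h1]
        by_cases hev : PySem.Int.mod n 2 = 0
        · rw [if_pos hev]
          rw [PySem.Int.mod_eq_emod_of_pos (by omega)] at hev
          have hm : n = 2 * (((n / 2).toNat : Nat) : Int) := by omega
          rw [PySem.Int.floordiv_eq_ediv_of_pos (by omega)]
          have hq : n / 2 = (((n / 2).toNat : Nat) : Int) := by omega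
          rw [hq, PySem.List.pyRange_zero_natCast]
          conv_lhs => rw [hm]
          rw [pvALoop_items_even]
          simp [List.map_map, Function.comp_def]
        · rw [if_neg hev]
          rw [PySem.Int.mod_eq_emod_of_pos (by omega)] at hev
          have hm : n = 2 * ((((n - 3) / 2).toNat : Nat) : Int) + 3 := by omega
          rw [PySem.Int.floordiv_eq_ediv_of_pos (by omega)]
          have hq : (n - 3) / 2 = ((((n - 3) / 2).toNat : Nat) : Int) := by omega
          rw [hq, PySem.List.pyRange_zero_natCast]
          conv_lhs => rw [hm]
          rw [pvALoop_items_odd]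
          simp [List.map_map, Function.comp_def]
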